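-- pv_equiv track=rewrite | github.com/Stitch3377/CodePath-TIP102 | session4.py | unique_souvenir_counts
-- ===== SOURCE A (Python) =====
-- def unique_souvenir_counts(souvenirs):
--     """Problem 2"""
--     map = {}
--     for s in souvenirs:
--         if s in map:
--             map[s] += 1
--         else:
--             map[s] = 1
--     return len(set(map.values())) == len(map.values())
-- ===== SOURCE B (Python) =====
-- def unique_souvenir_counts(souvenirs):
--     """Problem 2"""
--     counts = {}
--     for s in souvenirs:
--         counts[s] = counts.get(s, 0) + 1
--     vals = sorted(counts.values())
--     return all(a != b for a, b in zip(vals, vals[1:]))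
-- ===== Notes on version B (the rewrite author's own statement) =====
-- stated objective: alternative
-- what changed: Replaces the hash-set distinctness test len(set(values))==len(values) with sorting the counts and scanning adjacent pairs for an equal neighbour (sort-then-scan duplicate detection).
import Mathlib
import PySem

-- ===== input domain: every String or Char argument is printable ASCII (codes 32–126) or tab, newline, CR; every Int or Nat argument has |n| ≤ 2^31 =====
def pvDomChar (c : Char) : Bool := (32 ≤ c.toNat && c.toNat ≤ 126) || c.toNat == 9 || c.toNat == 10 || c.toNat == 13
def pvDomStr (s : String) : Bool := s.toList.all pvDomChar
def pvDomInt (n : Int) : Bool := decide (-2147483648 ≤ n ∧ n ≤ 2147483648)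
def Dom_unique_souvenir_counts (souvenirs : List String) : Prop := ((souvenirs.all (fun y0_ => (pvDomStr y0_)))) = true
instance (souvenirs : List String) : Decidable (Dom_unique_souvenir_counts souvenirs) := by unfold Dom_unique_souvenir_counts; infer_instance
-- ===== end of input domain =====

-- B replaces A's hash-set distinctness test on the counts with sort-then-scan of adjacent pairs (alternative strategy, not faster).

-- ===== PORT A =====
def unique_souvenir_counts (souvenirs : List String) : Bool :=
  let m := souvenirs.foldl (fun d s =>
      if d.contains s then d.insert s (d.getD s 0 + 1) else d.insert s (1 : Int))
    PySem.Dict.empty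
  PySem.Set.len (PySem.Set.ofList m.values) == PySem.List.len m.values

-- ===== PORT B =====
def unique_souvenir_counts_alt (souvenirs : List String) : Bool :=
  let counts := souvenirs.foldl (fun d s => d.insert s (d.getD s 0 + 1)) (PySem.Dict.empty : PySem.Dict String Int)
  let vals := PySem.List.sorted counts.values (fun x => x) false
  -- zip(vals, vals[1:]) with all(a != b)
  ((vals.zip (PySem.List.slice vals (some 1) none)).all (fun p => p.1 != p.2))

-- ===== PRECONDITION & SPEC =====
def Spec_unique_souvenir_counts (souvenirs : List String) (out : Bool) : Prop := out = unique_souvenir_counts_alt souvenirs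
instance (souvenirs : List String) (out : Bool) : Decidable (Spec_unique_souvenir_counts souvenirs out) := by unfold Spec_unique_souvenir_counts; infer_instance

-- ===== CLAIM (what is proved, stated in full; the proofs are below) =====
def Claim_equal_unique_souvenir_counts : Prop := ∀ (souvenirs : List String), Dom_unique_souvenir_counts souvenirs → Spec_unique_souvenir_counts souvenirs (unique_souvenir_counts souvenirs)

-- ===== LEMMAS AND PROOFS =====

-- A's branching update step equals B's unconditional one (when absent, getD yields the default 0).
lemma step_eq :
    (fun (d : PySem.Dict String Int) s =>
        if d.contains s then d.insert s (d.getD s 0 + 1) else d.insert s (1 : Int)) =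
    (fun (d : PySem.Dict String Int) s => d.insert s (d.getD s 0 + 1)) := by
  funext d s
  by_cases h : d.contains s
  · simp [h]
  · have h0 : d.getD s 0 = 0 := by
      have := PySem.Dict.get?_eq_none_iff_contains (d := d) (k := s)
      simp [PySem.Dict.getD, this.mpr (by simpa using h)]
    simp [h, h0]

-- Adjacent-pair scan on a ≤-sorted list decides Nodup.
lemma adj_scan_nodup (l : List Int) (hp : l.Pairwise (· ≤ ·)) :
    ((l.zip (l.drop 1)).all (fun p => p.1 != p.2)) = decide l.Nodup := by
  induction l with
  | nil => simp
  | cons a t ih =>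
    cases t with
    | nil => simp
    | cons b u =>
      have hp' : (b :: u).Pairwise (· ≤ ·) := hp.of_cons
      have h1 := (List.pairwise_cons.mp hp).1
      have hab : a ≤ b := h1 b List.mem_cons_self
      have hbu : ∀ x ∈ u, b ≤ x := fun x hx => (List.pairwise_cons.mp hp').1 x hx
      have ihr := ih hp'
      by_cases hn : (b :: u).Nodup
      · have hmem : a ∈ b :: u ↔ a = b := by
          constructor
          · intro hm
            rcases List.mem_cons.mp hm with h | h
            · exact h
            · exact le_antisymm hab (hbu a h)
          · intro h; exact h ▸ List.mem_cons_self
        simp only [List.drop_one, List.tail_cons, List.zip_cons_cons, List.all_cons] at *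
        rw [ihr]
        by_cases hab' : a = b
        · simp [hab', hn]
        · simp [hab', hn, List.nodup_cons, hmem]
      · have hn' : ¬(a :: b :: u).Nodup := fun hh => hn hh.of_cons
        simp only [List.drop_one, List.tail_cons, List.zip_cons_cons, List.all_cons] at *
        rw [ihr, decide_eq_false hn, decide_eq_false hn', Bool.and_false]

-- length of the deduplicated list equals the length iff Nodup
lemma ofList_length_eq_iff (vs : List Int) :
    (PySem.Set.ofList vs).length = vs.length ↔ vs.Nodup := by
  have hperm : (PySem.Set.ofList vs).Perm vs.dedup := by
    apply List.perm_of_nodup_nodup_toFinset_eq (PySem.Set.nodup_ofList vs) vs.nodup_dedup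
    ext x
    simp [List.mem_toFinset, PySem.Set.mem_ofList, List.mem_dedup]
  rw [hperm.length_eq]
  constructor
  · intro h
    have heq := List.Sublist.eq_of_length vs.dedup_sublist h
    exact heq ▸ vs.nodup_dedup
  · intro h
    rw [List.dedup_eq_self.mpr h]

-- the core: A's set-cardinality test equals B's sort-then-scan test, for any value list
lemma core (vs : List Int) :
    (PySem.Set.len (PySem.Set.ofList vs) == PySem.List.len vs) =
    (((PySem.List.sorted vs (fun x => x) false).zip
        (PySem.List.slice (PySem.List.sorted vs (fun x => x) false) (some 1) none)).all
      (fun p => p.1 != p.2)) := by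
  have hsl : PySem.List.slice (PySem.List.sorted vs (fun x => x) false) (some 1) none
      = (PySem.List.sorted vs (fun x => x) false).drop 1 := by
    rw [PySem.List.slice_from_one]; simp [List.drop_one]
  rw [hsl, adj_scan_nodup _ (PySem.List.sorted_pairwise vs (fun x => x))]
  have hperm := PySem.List.sorted_perm vs (fun x => x) false
  have hd : decide (PySem.List.sorted vs (fun x => x) false).Nodup = decide vs.Nodup :=
    decide_eq_decide.mpr hperm.nodup_iff
  rw [hd]
  have hlen : PySem.Set.len (PySem.Set.ofList vs) = ((PySem.Set.ofList vs).length : Int) := by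
    simp [PySem.Set.len]
  rw [hlen]
  simp only [PySem.List.len_eq]
  by_cases h : vs.Nodup
  · simp [h, (ofList_length_eq_iff vs).mpr h]
  · simp [h]
    intro hc
    exact h ((ofList_length_eq_iff vs).mp hc)

-- ===== VERDICT (by name: the statement is the Claim_ definition above) =====
theorem unique_souvenir_counts_spec : Claim_equal_unique_souvenir_counts := by
  intro souvenirs _
  unfold Spec_unique_souvenir_counts
  simp only [unique_souvenir_counts, unique_souvenir_counts_alt, step_eq]
  exact core ((souvenirs.foldl (fun d s => d.insert s (d.getD s 0 + 1)) PySem.Dict.empty).values)
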